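-- pv_equiv track=rewrite | github.com/vtroitio/Bomberman | src/game.py | inicializarPosicionesEsquinas
-- ===== SOURCE A (Python) =====
-- def inicializarPosicionesEsquinas(pilaresPorColumna, pilaresPorFila):
--     posicionesEsquinas = {"right": [], "left": [], "up": [], "down": []}
--
--     startingPosition = 47
--
--
--     for i in range(0, pilaresPorColumna):
--
--
--         offsetEsquinas = 50
--
--         tuplaRight = (startingPosition, startingPosition + 10, "up")
--         posicionesEsquinas["right"].append(tuplaRight)
--
--         tuplaRight = (startingPosition + offsetEsquinas, startingPosition + offsetEsquinas + 10, "down")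
--         posicionesEsquinas["right"].append(tuplaRight)
--
--
--         tuplaLeft = (startingPosition, startingPosition + 10, "up")
--         posicionesEsquinas["left"].append(tuplaLeft)
--
--         tuplaLeft = (startingPosition + offsetEsquinas, startingPosition + offsetEsquinas + 10, "down")
--         posicionesEsquinas["left"].append(tuplaLeft)
--
--         startingPosition = startingPosition + 75
--
--
--
--     startingPosition = 47
--
--     for i in range(0, pilaresPorFila):
--
--         offsetEsquinas = 50
--
--         tuplaUp = (startingPosition, startingPosition + 10, "left")
--         posicionesEsquinas["up"].append(tuplaUp)
--
--         tuplaUp = (startingPosition + offsetEsquinas, startingPosition + offsetEsquinas + 10, "right")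
--         posicionesEsquinas["up"].append(tuplaUp)
--
--         tuplaDown = (startingPosition, startingPosition + 10, "left")
--         posicionesEsquinas["down"].append(tuplaDown)
--
--         tuplaDown = (startingPosition + offsetEsquinas, startingPosition + offsetEsquinas + 10, "right")
--         posicionesEsquinas["down"].append(tuplaDown)
--
--         startingPosition = startingPosition + 75
--
--
--     return posicionesEsquinas
-- ===== SOURCE B (Python) =====
-- def esquinas(count, near, far):
--     starts = list(range(47, 47 + 75 * count, 75))
--     cerca = [(s, s + 10, near) for s in starts]
--     lejos = [(s + 50, s + 60, far) for s in starts]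
--     resultado = []
--     for par in zip(cerca, lejos):
--         resultado.extend(par)
--     return resultado
--
--
-- def inicializarPosicionesEsquinas(pilaresPorColumna, pilaresPorFila):
--     columnas = esquinas(pilaresPorColumna, "up", "down")
--     filas = esquinas(pilaresPorFila, "left", "right")
--     return {"right": columnas, "left": list(columnas),
--             "up": filas, "down": list(filas)}
-- ===== Notes on version B (the rewrite author's own statement) =====
-- stated objective: alternative
-- what changed: Instead of A's single accumulator loop that mutates a dict and emits four tuples per step, B materialises the arithmetic start-position list once, builds the near-corner and far-corner tuple lists as two separate parallel passes, and interleaves them with zip; the result is shared by the two keys of each axis.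
import Mathlib
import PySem

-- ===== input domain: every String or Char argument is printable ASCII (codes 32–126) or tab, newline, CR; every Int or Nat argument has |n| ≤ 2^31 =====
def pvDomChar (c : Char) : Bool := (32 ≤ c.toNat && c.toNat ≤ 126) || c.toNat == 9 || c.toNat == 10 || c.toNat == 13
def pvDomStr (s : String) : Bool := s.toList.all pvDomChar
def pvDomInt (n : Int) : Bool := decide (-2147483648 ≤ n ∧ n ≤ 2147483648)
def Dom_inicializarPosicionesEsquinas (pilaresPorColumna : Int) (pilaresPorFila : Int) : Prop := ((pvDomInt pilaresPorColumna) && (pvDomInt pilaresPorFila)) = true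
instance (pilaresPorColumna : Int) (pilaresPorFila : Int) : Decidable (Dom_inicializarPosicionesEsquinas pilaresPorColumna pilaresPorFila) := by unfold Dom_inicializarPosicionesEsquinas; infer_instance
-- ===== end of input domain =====

-- B replaces A's single accumulator loop by staged parallel passes (start positions, near list, far list) interleaved with zip (alternative decomposition, same values).

-- ===== PORT A =====
-- body of A's first loop: appends one 'up' and one 'down' corner pair to "right" and to "left"
def pvLoopCol (st : PySem.Dict String (List (Int × Int × String)) × Int) (_i : Int) :
    PySem.Dict String (List (Int × Int × String)) × Int :=
  let s := st.2
  let off : Int := 50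
  let d := st.1.modify "right" [] (fun l => l ++ [(s, s + 10, "up")])
  let d := d.modify "right" [] (fun l => l ++ [(s + off, s + off + 10, "down")])
  let d := d.modify "left" [] (fun l => l ++ [(s, s + 10, "up")])
  let d := d.modify "left" [] (fun l => l ++ [(s + off, s + off + 10, "down")])
  (d, s + 75)

-- body of A's second loop: appends one 'left' and one 'right' corner pair to "up" and to "down"
def pvLoopFila (st : PySem.Dict String (List (Int × Int × String)) × Int) (_i : Int) :
    PySem.Dict String (List (Int × Int × String)) × Int :=
  let s := st.2
  let off : Int := 50
  let d := st.1.modify "up" [] (fun l => l ++ [(s, s + 10, "left")])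
  let d := d.modify "up" [] (fun l => l ++ [(s + off, s + off + 10, "right")])
  let d := d.modify "down" [] (fun l => l ++ [(s, s + 10, "left")])
  let d := d.modify "down" [] (fun l => l ++ [(s + off, s + off + 10, "right")])
  (d, s + 75)

def inicializarPosicionesEsquinas (pilaresPorColumna : Int) (pilaresPorFila : Int) : List (String × List (Int × Int × String)) :=
  let d0 : PySem.Dict String (List (Int × Int × String)) :=
    PySem.Dict.ofList [("right", []), ("left", []), ("up", []), ("down", [])]
  let st1 := (PySem.List.pyRange 0 pilaresPorColumna 1).foldl pvLoopCol (d0, 47)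
  let st2 := (PySem.List.pyRange 0 pilaresPorFila 1).foldl pvLoopFila (st1.1, 47)
  st2.1.items

-- ===== PORT B =====
def esquinas (count : Int) (near far : String) : List (Int × Int × String) :=
  let starts := PySem.List.pyRange 47 (47 + 75 * count) 75
  let cerca := starts.map (fun s => (s, s + 10, near))
  let lejos := starts.map (fun s => (s + 50, s + 60, far))
  (cerca.zip lejos).foldl (fun acc p => acc ++ [p.1, p.2]) []

def inicializarPosicionesEsquinas_alt (pilaresPorColumna : Int) (pilaresPorFila : Int) : List (String × List (Int × Int × String)) :=
  let columnas := esquinas pilaresPorColumna "up" "down"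
  let filas := esquinas pilaresPorFila "left" "right"
  [("right", columnas), ("left", columnas), ("up", filas), ("down", filas)]

-- ===== PRECONDITION & SPEC =====
def Spec_inicializarPosicionesEsquinas (pilaresPorColumna : Int) (pilaresPorFila : Int) (out : List (String × List (Int × Int × String))) : Prop := out = inicializarPosicionesEsquinas_alt pilaresPorColumna pilaresPorFila
instance (pilaresPorColumna : Int) (pilaresPorFila : Int) (out : List (String × List (Int × Int × String))) : Decidable (Spec_inicializarPosicionesEsquinas pilaresPorColumna pilaresPorFila out) := by unfold Spec_inicializarPosicionesEsquinas; infer_instance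

-- ===== CLAIM (what is proved, stated in full; the proofs are below) =====
def Claim_equal_inicializarPosicionesEsquinas : Prop := ∀ (pilaresPorColumna : Int) (pilaresPorFila : Int), Dom_inicializarPosicionesEsquinas pilaresPorColumna pilaresPorFila → Spec_inicializarPosicionesEsquinas pilaresPorColumna pilaresPorFila (inicializarPosicionesEsquinas pilaresPorColumna pilaresPorFila)

-- ===== LEMMAS AND PROOFS =====

-- the common per-step corner list, in the recursive form A's loops produce
def pvGen (near far : String) : Int → Nat → List (Int × Int × String)
  | _, 0 => []
  | s, m + 1 => (s, s + 10, near) :: (s + 50, s + 60, far) :: pvGen near far (s + 75) m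

-- interleaving the zip of two maps over the same list is a flatMap of both images
theorem zip_map_foldl {α β : Type} (f g : α → β) (xs : List α) : ∀ (acc : List β),
    ((xs.map f).zip (xs.map g)).foldl (fun acc p => acc ++ [p.1, p.2]) acc
      = acc ++ xs.flatMap (fun s => [f s, g s]) := by
  induction xs with
  | nil => intro acc; simp
  | cons x xs ih => intro acc; simp [ih]

-- the step-75 range of B is the arithmetic sequence of A's running start positions
theorem starts_eq (c : Int) :
    PySem.List.pyRange 47 (47 + 75 * c) 75
      = (List.range c.toNat).map (fun (k : Nat) => 47 + 75 * (k : Int)) := by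
  rw [PySem.List.pyRange_of_pos _ _ (by norm_num : (0 : Int) < 75)]
  have hn : (if (47 : Int) < 47 + 75 * c then ((47 + 75 * c - 47 + 75 - 1) / 75).toNat else 0) = c.toNat := by
    split_ifs with h <;> omega
  rw [hn]

theorem flatMap_range_pvGen (near far : String) (m : Nat) : ∀ (s : Int),
    ((List.range m).map (fun (k : Nat) => s + 75 * (k : Int))).flatMap
      (fun t => [(t, t + 10, near), (t + 50, t + 60, far)]) = pvGen near far s m := by
  induction m with
  | zero => intro s; rfl
  | succ m ih =>
      intro s
      rw [List.range_succ_eq_map]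
      have hmap : (List.range m).map ((fun (k : Nat) => s + 75 * (k : Int)) ∘ Nat.succ)
          = (List.range m).map (fun (k : Nat) => (s + 75) + 75 * (k : Int)) := by
        apply List.map_congr_left; intro k _; simp [Function.comp]; ring
      rw [List.map_cons, List.flatMap_cons, List.map_map, hmap, ih (s + 75), pvGen]
      norm_num

theorem esquinas_eq_pvGen (c : Int) (near far : String) :
    esquinas c near far = pvGen near far 47 c.toNat := by
  unfold esquinas
  rw [starts_eq, zip_map_foldl]
  simpa using flatMap_range_pvGen near far c.toNat 47

theorem foldl_pvLoopCol (xs : List Int) : ∀ (r l u dn : List (Int × Int × String)) (s : Int),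
    xs.foldl pvLoopCol (PySem.Dict.mk [("right", r), ("left", l), ("up", u), ("down", dn)], s)
      = (PySem.Dict.mk [("right", r ++ pvGen "up" "down" s xs.length),
          ("left", l ++ pvGen "up" "down" s xs.length), ("up", u), ("down", dn)],
          s + 75 * xs.length) := by
  induction xs with
  | nil => intro r l u dn s; simp [pvGen]
  | cons x xs ih =>
      intro r l u dn s
      rw [List.foldl_cons]
      have hstep : pvLoopCol (PySem.Dict.mk [("right", r), ("left", l), ("up", u), ("down", dn)], s) x
          = (PySem.Dict.mk [("right", r ++ [(s, s + 10, "up"), (s + 50, s + 60, "down")]),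
              ("left", l ++ [(s, s + 10, "up"), (s + 50, s + 60, "down")]), ("up", u), ("down", dn)], s + 75) := by
        simp [pvLoopCol, PySem.Dict.modify, PySem.Dict.get?_insert, PySem.Dict.items_insert,
          PySem.Dict.contains_insert, PySem.Dict.ext_iff,
          PySem.Dict.getD_eq_get?_getD, PySem.Dict.get?_mk_cons]
        omega
      rw [hstep, ih]
      simp [pvGen]
      ring

theorem foldl_pvLoopFila (xs : List Int) : ∀ (r l u dn : List (Int × Int × String)) (s : Int),
    xs.foldl pvLoopFila (PySem.Dict.mk [("right", r), ("left", l), ("up", u), ("down", dn)], s)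
      = (PySem.Dict.mk [("right", r), ("left", l),
          ("up", u ++ pvGen "left" "right" s xs.length),
          ("down", dn ++ pvGen "left" "right" s xs.length)],
          s + 75 * xs.length) := by
  induction xs with
  | nil => intro r l u dn s; simp [pvGen]
  | cons x xs ih =>
      intro r l u dn s
      rw [List.foldl_cons]
      have hstep : pvLoopFila (PySem.Dict.mk [("right", r), ("left", l), ("up", u), ("down", dn)], s) x
          = (PySem.Dict.mk [("right", r), ("left", l),
              ("up", u ++ [(s, s + 10, "left"), (s + 50, s + 60, "right")]),
              ("down", dn ++ [(s, s + 10, "left"), (s + 50, s + 60, "right")])], s + 75) := by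
        simp [pvLoopFila, PySem.Dict.modify, PySem.Dict.get?_insert, PySem.Dict.items_insert,
          PySem.Dict.contains_insert, PySem.Dict.ext_iff,
          PySem.Dict.getD_eq_get?_getD, PySem.Dict.get?_mk_cons]
        omega
      rw [hstep, ih]
      simp [pvGen]
      ring

-- ===== VERDICT (by name: the statement is the Claim_ definition above) =====
theorem inicializarPosicionesEsquinas_spec : Claim_equal_inicializarPosicionesEsquinas := by
  intro c f _
  unfold Spec_inicializarPosicionesEsquinas inicializarPosicionesEsquinas inicializarPosicionesEsquinas_alt
  have hd0 : (PySem.Dict.ofList [("right", ([] : List (Int × Int × String))), ("left", []), ("up", []), ("down", [])])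
      = PySem.Dict.mk [("right", []), ("left", []), ("up", []), ("down", [])] := by decide
  simp only [hd0, foldl_pvLoopCol, foldl_pvLoopFila]
  simp [esquinas_eq_pvGen, PySem.List.length_pyRange_one]
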